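-- pv_equiv track=rewrite | github.com/SimonDMurray/dotplot_fasta | generating_matrix.py | creating_matrix
-- ===== SOURCE A (Python) =====
-- def creating_matrix(seq1, seq2):
--     '''
--     generates matrix from the
--     strings formed from the
--     2 input files
--     '''
--     matrix = [[" " for x in range(len(seq1))] for y in range(len(seq2))]
--     for index1, value1 in enumerate(seq2):
--         for index2, value2 in enumerate(seq1):
--             if value1 == value2:
--                 matrix[index1][index2] = value1
--             else:
--                 matrix[index1][index2] = " "
--     return matrix
-- ===== SOURCE B (Python) =====
-- def creating_matrix(seq1, seq2):
--     '''
--     generates matrix from the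
--     strings formed from the
--     2 input files
--     '''
--     index = {}
--     for j, c in enumerate(seq1):
--         index.setdefault(c, []).append(j)
--     matrix = []
--     for i, c in enumerate(seq2):
--         row = [" "] * len(seq1)
--         for j in index.get(c, []):
--             row[j] = c
--         matrix.append(row)
--     return matrix
-- ===== Notes on version B (the rewrite author's own statement) =====
-- stated objective: faster
-- what changed: B builds an inverted index of seq1 character positions once, then fills each row by writing only the matching cells instead of scanning all of seq1 for every seq2 character.
import Mathlib
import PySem

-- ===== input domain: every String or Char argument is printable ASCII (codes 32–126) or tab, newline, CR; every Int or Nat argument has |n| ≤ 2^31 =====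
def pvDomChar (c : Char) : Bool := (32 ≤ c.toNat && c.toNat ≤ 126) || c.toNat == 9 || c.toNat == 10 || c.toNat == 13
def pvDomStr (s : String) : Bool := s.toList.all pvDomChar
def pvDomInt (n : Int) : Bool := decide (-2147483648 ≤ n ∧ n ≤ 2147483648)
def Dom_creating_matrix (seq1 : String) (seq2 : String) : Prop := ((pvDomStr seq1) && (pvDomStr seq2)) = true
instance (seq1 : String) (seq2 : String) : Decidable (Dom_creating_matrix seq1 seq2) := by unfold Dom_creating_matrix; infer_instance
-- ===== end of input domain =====

-- B replaces A's per-cell scan of seq1 by a one-pass inverted index of seq1 positions; only matching cells of each row are written.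

-- ===== PORT A =====
-- literal transliteration: build the all-spaces matrix, then the nested enumerate loops
-- assign matrix[index1][index2] (fetch row, set cell, store row — the same values Python computes).
def creating_matrix (seq1 : String) (seq2 : String) : List (List String) :=
  let l1 := seq1.toList
  let l2 := seq2.toList
  let matrix := l2.map (fun _ => l1.map (fun _ => " "))
  (PySem.List.enumerate l2).foldl (fun m p =>
    (PySem.List.enumerate l1).foldl (fun m' q =>
      PySem.List.pySetD m' p.1
        (PySem.List.pySetD (PySem.List.pyGetD m' p.1 []) q.1
          (if p.2 == q.2 then String.mk [p.2] else " "))) m) matrix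

-- ===== PORT B =====
-- index.setdefault(c, []).append(j) == d[c] = d.get(c, []) + [j] with first-insertion key order == Dict.modify.
def creating_matrix_alt (seq1 : String) (seq2 : String) : List (List String) :=
  let l1 := seq1.toList
  let l2 := seq2.toList
  let index := (PySem.List.enumerate l1).foldl
    (fun d q => d.modify q.2 [] (· ++ [q.1])) PySem.Dict.empty
  (PySem.List.enumerate l2).foldl (fun m p =>
    m ++ [(index.getD p.2 []).foldl
      (fun row j => PySem.List.pySetD row j (String.mk [p.2]))
      (l1.map (fun _ => " "))]) []

-- ===== PRECONDITION & SPEC =====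
def Spec_creating_matrix (seq1 : String) (seq2 : String) (out : List (List String)) : Prop := out = creating_matrix_alt seq1 seq2
instance (seq1 : String) (seq2 : String) (out : List (List String)) : Decidable (Spec_creating_matrix seq1 seq2 out) := by unfold Spec_creating_matrix; infer_instance

-- ===== CLAIM (what is proved, stated in full; the proofs are below) =====
def Claim_equal_creating_matrix : Prop := ∀ (seq1 : String) (seq2 : String), Dom_creating_matrix seq1 seq2 → Spec_creating_matrix seq1 seq2 (creating_matrix seq1 seq2)

-- ===== LEMMAS AND PROOFS =====

-- the common canonical row for character c
def pvRow (l1 : List Char) (c : Char) : List String :=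
  l1.map (fun c2 => if c == c2 then String.mk [c] else " ")

-- (1) writing a value at a list of nonnegative Int positions, pointwise
theorem pv_foldl_set_getElem? (v : String) :
    ∀ (ps : List Int) (r : List String), (∀ j ∈ ps, 0 ≤ j) → ∀ (i : Nat),
      (ps.foldl (fun r j => PySem.List.pySetD r j v) r)[i]? =
        if (i : Int) ∈ ps ∧ i < r.length then some v else r[i]? := by
  intro ps
  induction ps with
  | nil => intro r _ i; simp
  | cons j ps ih =>
    intro r hpos i
    have hj : 0 ≤ j := hpos j (List.mem_cons_self ..)
    simp only [List.foldl_cons, PySem.List.pySetD_of_nonneg r v hj]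
    rw [ih _ (fun x hx => hpos x (List.mem_cons_of_mem _ hx))]
    simp only [List.length_set, List.getElem?_set, List.mem_cons]
    have hji : (j.toNat = i) ↔ ((i : Int) = j) := by omega
    by_cases h1 : (i : Int) ∈ ps <;> by_cases h2 : (i : Int) = j <;>
      by_cases h3 : i < r.length <;> simp [h1, h2, h3, hji] <;> omega

-- (2) the inner enumerate-loop of A, pointwise
theorem pv_inner_getElem? (f : Char → String) :
    ∀ (l1 : List Char) (s : Nat) (r : List String) (i : Nat),
      ((PySem.List.enumerate l1 (s : Int)).foldl
          (fun row q => PySem.List.pySetD row q.1 (f q.2)) r)[i]? =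
        if s ≤ i ∧ i - s < l1.length ∧ i < r.length then (l1[i - s]?).map f
        else r[i]? := by
  intro l1
  induction l1 with
  | nil => intro s r i; simp
  | cons c l1 ih =>
    intro s r i
    rw [PySem.List.enumerate_cons]
    simp only [List.foldl_cons]
    have hc : ((s : Int) + 1) = ((s + 1 : Nat) : Int) := by push_cast; ring
    rw [hc, PySem.List.pySetD_natCast, ih (s + 1) (r.set s (f c)) i]
    simp only [List.length_set, List.length_cons]
    by_cases h3 : i < r.length
    · by_cases h4 : i = s
      · subst h4
        have h1' : ¬ (i + 1 ≤ i) := by omega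
        simp [h1', h3, List.getElem?_set]
      · by_cases h1 : s ≤ i
        · have h1' : s + 1 ≤ i := by omega
          have hix : i - s = (i - (s + 1)) + 1 := by omega
          by_cases h2 : i - (s + 1) < l1.length
          · have h2' : i - s < l1.length + 1 := by omega
            simp [h1', h2, h3, h1, h2', hix]
          · have h2' : ¬ (i - s < l1.length + 1) := by omega
            simp [h1', h2, h2', h3, List.getElem?_set, List.getElem_set, Ne.symm h4]
        · have h1' : ¬ (s + 1 ≤ i) := by omega
          have hne : s ≠ i := fun e => h1 (le_of_eq e)
          simp [h1, h1', List.getElem?_set, List.getElem_set, hne, Ne.symm hne]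
    · have hnone : r[i]? = none := List.getElem?_eq_none (by omega)
      by_cases hsi : s = i
      · subst hsi; simp [h3, List.getElem?_set, hnone]
      · simp [h3, List.getElem?_set, hsi, hnone]

-- (3) the outer enumerate-loop of A (with the inner loop fused into g), pointwise
theorem pv_outer_getElem? (g : Char → List String → List String) :
    ∀ (l2 : List Char) (s : Nat) (m : List (List String)) (i : Nat),
      ((PySem.List.enumerate l2 (s : Int)).foldl
          (fun m' p => PySem.List.pySetD m' p.1 (g p.2 (PySem.List.pyGetD m' p.1 []))) m)[i]? =
        if s ≤ i ∧ i - s < l2.length ∧ i < m.length then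
          (l2[i - s]?).map (fun c => g c (PySem.List.pyGetD m (i : Int) []))
        else m[i]? := by
  intro l2
  induction l2 with
  | nil => intro s m i; simp
  | cons c l2 ih =>
    intro s m i
    rw [PySem.List.enumerate_cons]
    simp only [List.foldl_cons]
    have hc : ((s : Int) + 1) = ((s + 1 : Nat) : Int) := by push_cast; ring
    rw [hc, PySem.List.pySetD_natCast, ih (s + 1) _ i]
    by_cases hs : s < m.length
    · have hget : ∀ (k : Nat), PySem.List.pyGetD
          (m.set s (g c (PySem.List.pyGetD m (s : Int) []))) (k : Int) [] =
          if k = s then g c (PySem.List.pyGetD m (s : Int) []) else PySem.List.pyGetD m (k : Int) [] := by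
        intro k
        have h := PySem.List.pyGetD_pySetD_natCast m s k
          (g c (PySem.List.pyGetD m (s : Int) [])) ([] : List String) hs
        rw [PySem.List.pySetD_natCast] at h
        exact h
      simp only [List.length_set, List.length_cons, hget i]
      by_cases h3 : i < m.length
      · by_cases h4 : i = s
        · subst h4
          have h1' : ¬ (i + 1 ≤ i) := by omega
          simp [h1', h3, List.getElem?_set]
        · by_cases h1 : s ≤ i
          · have h1' : s + 1 ≤ i := by omega
            have hix : i - s = (i - (s + 1)) + 1 := by omega
            by_cases h2 : i - (s + 1) < l2.length
            · have h2' : i - s < l2.length + 1 := by omega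
              simp [h1', h2, h3, h1, h2', hix, h4]
            · have h2' : ¬ (i - s < l2.length + 1) := by omega
              simp [h1', h2, h2', h3, List.getElem?_set, List.getElem_set, Ne.symm h4]
          · have h1' : ¬ (s + 1 ≤ i) := by omega
            have hne : s ≠ i := fun e => h1 (le_of_eq e)
            simp [h1, h1', List.getElem?_set, List.getElem_set, hne, Ne.symm hne]
      · have hnone : m[i]? = none := List.getElem?_eq_none (by omega)
        by_cases hsi : s = i
        · subst hsi; simp [h3, List.getElem?_set, hnone]
        · simp [h3, List.getElem?_set, hsi, hnone]
    · have hset : m.set s (g c (PySem.List.pyGetD m (s : Int) [])) = m := by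
        apply List.ext_getElem?
        intro k
        rw [List.getElem?_set]
        by_cases hk : s = k
        · subst hk
          rw [if_pos rfl, if_neg hs]
          exact (List.getElem?_eq_none (by omega)).symm
        · rw [if_neg hk]
      rw [hset]
      simp only [List.length_cons]
      by_cases h1 : s ≤ i <;> by_cases h3 : i < m.length <;>
        simp [h1, h3] <;> omega

-- A's outer body: the repeated writes at row p.1 fuse into one write of the folded row
theorem pv_fuse (f : Int × Char → String) (n : Nat) :
    ∀ (qs : List (Int × Char)) (m : List (List String)),
      qs.foldl (fun m' q => PySem.List.pySetD m' (n : Int)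
          (PySem.List.pySetD (PySem.List.pyGetD m' (n : Int) []) q.1 (f q))) m
      = PySem.List.pySetD m (n : Int)
          (qs.foldl (fun row q => PySem.List.pySetD row q.1 (f q))
            (PySem.List.pyGetD m (n : Int) [])) := by
  intro qs
  induction qs with
  | nil =>
    intro m
    simp only [List.foldl_nil, PySem.List.pySetD_natCast, PySem.List.pyGetD_natCast]
    symm
    apply List.ext_getElem?
    intro k
    rw [List.getElem?_set]
    by_cases hk : n = k
    · subst hk
      by_cases hl : n < m.length
      · rw [if_pos rfl, if_pos hl, List.getD_eq_getElem?_getD, List.getElem?_eq_getElem hl]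
        rfl
      · rw [if_pos rfl, if_neg hl]
        exact (List.getElem?_eq_none (by omega)).symm
    · rw [if_neg hk]
  | cons q qs ih =>
    intro m
    simp only [List.foldl_cons]
    rw [ih]
    by_cases hn : n < m.length
    · rw [PySem.List.pyGetD_pySetD_natCast m n n _ _ hn]
      simp [PySem.List.pySetD_natCast, List.set_set]
    · have hgd : PySem.List.pyGetD m (n : Int) [] = [] := by
        rw [PySem.List.pyGetD_natCast, List.getD_eq_getElem?_getD,
          List.getElem?_eq_none (by omega)]
        rfl
      have hset : ∀ (r : List String), PySem.List.pySetD m (n : Int) r = m := by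
        intro r
        rw [PySem.List.pySetD_natCast]
        apply List.ext_getElem?
        intro k
        rw [List.getElem?_set]
        by_cases hk : n = k
        · subst hk
          rw [if_pos rfl, if_neg hn]
          exact (List.getElem?_eq_none (by omega)).symm
        · rw [if_neg hk]
      simp only [hset]

-- the positions list of character c in l1, as B's dict produces it
theorem pv_index_getD (l1 : List Char) (c : Char) :
    ((PySem.List.enumerate l1).foldl
        (fun d q => d.modify q.2 [] (· ++ [q.1])) PySem.Dict.empty).getD c [] =
      (((PySem.List.enumerate l1).map Prod.swap).filter (fun p => p.1 == c)).map (·.2) := by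
  have h1 : (PySem.List.enumerate l1).foldl
      (fun d q => d.modify q.2 [] (· ++ [q.1])) PySem.Dict.empty =
      ((PySem.List.enumerate l1).map Prod.swap).foldl
      (fun d p => d.modify p.1 [] (· ++ [p.2])) PySem.Dict.empty := by
    rw [List.foldl_map]
    rfl
  rw [h1, PySem.Dict.getD_foldl_modify_append]
  simp

theorem pv_mem_positions (l1 : List Char) (c : Char) (i : Nat) :
    ((i : Int) ∈ (((PySem.List.enumerate l1).map Prod.swap).filter (fun p => p.1 == c)).map (·.2)) ↔
      ∃ h : i < l1.length, l1[i] = c := by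
  simp only [List.mem_map, List.mem_filter, beq_iff_eq]
  constructor
  · rintro ⟨p, ⟨⟨q, hq, rfl⟩, hc⟩, hv⟩
    rw [PySem.List.mem_enumerate_iff] at hq
    obtain ⟨k, hk, rfl⟩ := hq
    simp only [Prod.swap] at hc hv
    have : k = i := by omega
    subst this
    exact ⟨hk, hc⟩
  · rintro ⟨h, hc⟩
    refine ⟨(l1[i], (i : Int)), ⟨⟨((i : Int), l1[i]), ?_, rfl⟩, by simpa using hc⟩, rfl⟩
    rw [PySem.List.mem_enumerate_iff]
    exact ⟨i, h, by simp⟩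

theorem pv_positions_nonneg (l1 : List Char) (c : Char) :
    ∀ j ∈ (((PySem.List.enumerate l1).map Prod.swap).filter (fun p => p.1 == c)).map (·.2), 0 ≤ j := by
  intro j hj
  simp only [List.mem_map, List.mem_filter] at hj
  obtain ⟨p, ⟨⟨q, hq, rfl⟩, _⟩, rfl⟩ := hj
  rw [PySem.List.mem_enumerate_iff] at hq
  obtain ⟨k, hk, rfl⟩ := hq
  simp

-- B's row for character c equals pvRow
theorem pv_row_B (l1 : List Char) (c : Char) :
    (((PySem.List.enumerate l1).foldl
        (fun d q => d.modify q.2 [] (· ++ [q.1])) PySem.Dict.empty).getD c []).foldl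
      (fun row j => PySem.List.pySetD row j (String.mk [c]))
      (l1.map (fun _ => " ")) = pvRow l1 c := by
  rw [pv_index_getD]
  apply List.ext_getElem?
  intro i
  rw [pv_foldl_set_getElem? (String.mk [c]) _ _ (pv_positions_nonneg l1 c) i]
  simp only [pvRow, List.getElem?_map, List.length_map, pv_mem_positions]
  by_cases h : i < l1.length
  · rw [List.getElem?_eq_getElem h]
    by_cases hc : l1[i] = c
    · simp [h, hc]
    · have hcc : ¬ (c = l1[i]) := fun e => hc e.symm
      simp [h, hc, hcc]
  · rw [List.getElem?_eq_none (by omega)]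
    simp [h]

-- B's append loop is a map
theorem pv_append_loop (h : Char → List String) :
    ∀ (l : List Char) (s : Int) (acc : List (List String)),
      (PySem.List.enumerate l s).foldl (fun m p => m ++ [h p.2]) acc = acc ++ l.map h := by
  intro l
  induction l with
  | nil => intro s acc; simp
  | cons c l ih =>
    intro s acc
    rw [PySem.List.enumerate_cons]
    simp [ih]

-- A's inner loop on a blank row of the right length yields pvRow
theorem pv_inner_row (l1 : List Char) (c : Char) (r : List String)
    (hr : r.length = l1.length) :
    (PySem.List.enumerate l1).foldl
      (fun row q => PySem.List.pySetD row q.1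
        (if c == q.2 then String.mk [c] else " ")) r = pvRow l1 c := by
  apply List.ext_getElem?
  intro i
  have h := pv_inner_getElem? (fun c2 => if c == c2 then String.mk [c] else " ") l1 0 r i
  rw [Nat.cast_zero] at h
  rw [h]
  simp only [pvRow, List.getElem?_map, hr, Nat.sub_zero, Nat.zero_le, true_and]
  by_cases hi : i < l1.length
  · simp [hi]
  · rw [List.getElem?_eq_none (show l1.length ≤ i by omega),
      List.getElem?_eq_none (show r.length ≤ i by omega)]
    simp [hi]

-- ===== VERDICT (by name: the statement is the Claim_ definition above) =====
theorem creating_matrix_spec : Claim_equal_creating_matrix := by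
  intro seq1 seq2 _
  unfold Spec_creating_matrix creating_matrix creating_matrix_alt
  dsimp only
  set l1 := seq1.toList with hl1
  set l2 := seq2.toList with hl2
  -- B side: the append loop is a map, each row is pvRow
  rw [pv_append_loop (fun c =>
    (((PySem.List.enumerate l1).foldl
        (fun d q => d.modify q.2 [] (· ++ [q.1])) PySem.Dict.empty).getD c []).foldl
      (fun row j => PySem.List.pySetD row j (String.mk [c]))
      (l1.map (fun _ => " ")))]
  simp only [List.nil_append, pv_row_B]
  -- A side: fuse the inner loop, then use the pointwise outer lemma
  rw [PySem.List.foldl_congr_mem (PySem.List.enumerate l2) _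
    (fun m p => PySem.List.pySetD m p.1
      ((PySem.List.enumerate l1).foldl
        (fun row q => PySem.List.pySetD row q.1
          (if p.2 == q.2 then String.mk [p.2] else " "))
        (PySem.List.pyGetD m p.1 []))) _ ?hcong]
  case hcong =>
    intro m p hp
    rw [PySem.List.mem_enumerate_iff] at hp
    obtain ⟨k, hk, rfl⟩ := hp
    simp only [Int.zero_add]
    exact pv_fuse (fun q => if l2[k] == q.2 then String.mk [l2[k]] else " ") k
      (PySem.List.enumerate l1) m
  apply List.ext_getElem?
  intro i
  have hA := pv_outer_getElem?
    (fun c r0 => (PySem.List.enumerate l1).foldl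
      (fun row q => PySem.List.pySetD row q.1
        (if c == q.2 then String.mk [c] else " ")) r0)
    l2 0 (l2.map (fun _ => l1.map (fun _ => " "))) i
  rw [Nat.cast_zero] at hA
  rw [hA]
  simp only [List.length_map, List.getElem?_map, Nat.sub_zero, Nat.zero_le, true_and]
  by_cases h : i < l2.length
  · have hget : PySem.List.pyGetD (l2.map (fun _ => l1.map (fun _ => (" " : String)))) (i : Int) [] =
        l1.map (fun _ => " ") := by
      rw [PySem.List.pyGetD_natCast, List.getD_eq_getElem?_getD,
        List.getElem?_map, List.getElem?_eq_getElem h]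
      rfl
    rw [hget, List.getElem?_eq_getElem h]
    simp only [h, and_true, if_true, Option.map_some]
    congr 1
    exact pv_inner_row l1 l2[i] (l1.map (fun _ => " ")) (by simp)
  · rw [List.getElem?_eq_none (show l2.length ≤ i by omega)]
    simp [h]
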